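-- pv_equiv track=rewrite | github.com/faulknerpearce/advent_of_code | 2016/day_8/part_1.py | part_one
-- ===== SOURCE A (Python) =====
-- def turn_pixels_on(end_col, end_row, matrix):
--      for row in range(end_row):
--           for col in range(end_col):
--                matrix[row][col] = '#'
--      return matrix
--
-- def shift_row(start_row, shift_amount, matrix):
--      for _ in range(shift_amount):
--           matrix[start_row] = matrix[start_row][-1:] + matrix[start_row][:-1]
--      return matrix
--
-- def get_elements(start_col, matrix):
--      elements = []
--
--      for i in range(len(matrix)):
--           elements.append(matrix[i][start_col])
--      return elements
--
-- def shift_column(start_col, shift_amount, matrix):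
--      for _ in range(shift_amount):
--           pixels = get_elements(start_col, matrix)
--           matrix[0][start_col] = pixels[-1]
--
--           for i in range(1, len(matrix)):
--                matrix[i][start_col] = pixels[i-1]
--      return matrix
--
-- def part_one(instructions, screen):
--      for instruction in instructions:
--
--           if instruction[0] == 'rect':
--                start_col = int(instruction[1])
--                start_row = int(instruction[2])
--
--                screen = turn_pixels_on(int(start_col), int(start_row), screen)
--           elif instruction[0] == 'rotate':
--                if instruction[1] == 'row':
--                     swich_row = int(instruction[2])
--                     swich_by = int(instruction[3])
--
--                     screen = shift_row(swich_row, swich_by, screen)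
--                else:
--                     swich_row = int(instruction[2])
--                     swich_by = int(instruction[3])
--
--                     screen = shift_column(swich_row, swich_by, screen)
--      return screen
-- ===== SOURCE B (Python) =====
-- # B: rotations done in one closed-form step (shift by amount mod length) instead
-- # of A's amount-many single-cell shifts; the grid is rebuilt in a fresh copy, so
-- # return-value equivalence only: A mutates `screen` in place, B does not.
-- def _rot(xs, k):
--     n = len(xs)
--     if n == 0:
--         return []
--     k %= n
--     if k == 0:
--         return list(xs)
--     return xs[-k:] + xs[:-k]
--
-- def part_one(instructions, screen):
--     grid = [list(row) for row in screen]
--     for ins in instructions: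
--         if ins[0] == 'rect':
--             a, b = int(ins[1]), int(ins[2])
--             for r in range(b):
--                 for c in range(a):
--                     grid[r][c] = '#'
--         elif ins[0] == 'rotate':
--             idx, amt = int(ins[2]), int(ins[3])
--             if amt > 0:
--                 if ins[1] == 'row':
--                     grid[idx] = _rot(grid[idx], amt)
--                 else:
--                     col = _rot([row[idx] for row in grid], amt)
--                     for row, v in zip(grid, col):
--                         row[idx] = v
--     return grid
-- ===== Notes on version B (the rewrite author's own statement) =====
-- stated objective: alternative
-- what changed: B replaces A's shift-amount-many single-cell shift passes (for both row and column rotations) by one closed-form rotation by amount mod length computed with two slices, rebuilding the grid in a fresh copy instead of mutating in place.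
import Mathlib
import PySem

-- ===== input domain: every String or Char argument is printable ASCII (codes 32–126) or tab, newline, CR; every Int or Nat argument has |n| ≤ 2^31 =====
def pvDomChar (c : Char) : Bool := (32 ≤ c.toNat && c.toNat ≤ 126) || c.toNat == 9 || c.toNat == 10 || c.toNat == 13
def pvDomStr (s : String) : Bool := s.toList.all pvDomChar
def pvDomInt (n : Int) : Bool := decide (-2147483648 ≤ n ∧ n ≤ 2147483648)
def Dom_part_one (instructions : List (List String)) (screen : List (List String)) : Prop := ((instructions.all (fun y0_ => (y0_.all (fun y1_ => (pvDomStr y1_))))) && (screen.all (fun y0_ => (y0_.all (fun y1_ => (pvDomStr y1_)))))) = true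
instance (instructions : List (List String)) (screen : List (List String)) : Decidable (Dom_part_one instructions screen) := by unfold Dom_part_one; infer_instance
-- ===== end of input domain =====

-- B performs every rotation in ONE closed-form step (shift by amount mod length via two
-- slices) instead of A's amount-many single-cell shift passes, and rebuilds the grid in a
-- fresh copy; equivalence is about the RETURN value only (Python A mutates `screen` in
-- place, Python B does not).

-- ===== PORT A =====
def turn_pixels_on (end_col end_row : Int) (matrix : List (List String)) : List (List String) :=
  (PySem.List.pyRange 0 end_row 1).foldl (fun m row =>
    (PySem.List.pyRange 0 end_col 1).foldl (fun m2 col =>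
      -- matrix[row][col] = '#'  (pySetD/pyGetD: in range under Pre_)
      PySem.List.pySetD m2 row (PySem.List.pySetD (PySem.List.pyGetD m2 row []) col "#")) m) matrix

def shift_row (start_row shift_amount : Int) (matrix : List (List String)) : List (List String) :=
  (PySem.List.pyRange 0 shift_amount 1).foldl (fun m _ =>
    -- matrix[start_row] = matrix[start_row][-1:] + matrix[start_row][:-1]
    PySem.List.pySetD m start_row
      (PySem.List.slice (PySem.List.pyGetD m start_row []) (some (-1)) none
        ++ PySem.List.slice (PySem.List.pyGetD m start_row []) none (some (-1)))) matrix

def get_elements (start_col : Int) (matrix : List (List String)) : List String :=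
  (PySem.List.pyRange 0 (matrix.length : Int) 1).foldl (fun elements i =>
    elements ++ [PySem.List.pyGetD (PySem.List.pyGetD matrix i []) start_col ""]) []

def shift_column (start_col shift_amount : Int) (matrix : List (List String)) : List (List String) :=
  (PySem.List.pyRange 0 shift_amount 1).foldl (fun m _ =>
    let pixels := get_elements start_col m
    let m1 := PySem.List.pySetD m 0
      (PySem.List.pySetD (PySem.List.pyGetD m 0 []) start_col (PySem.List.pyGetD pixels (-1) ""))
    (PySem.List.pyRange 1 (m1.length : Int) 1).foldl (fun m2 i =>
      PySem.List.pySetD m2 i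
        (PySem.List.pySetD (PySem.List.pyGetD m2 i []) start_col
          (PySem.List.pyGetD pixels (i - 1) ""))) m1) matrix

def part_one (instructions : List (List String)) (screen : List (List String)) : List (List String) :=
  instructions.foldl (fun scr instruction =>
    if PySem.List.pyGetD instruction 0 "" = "rect" then
      turn_pixels_on ((PySem.Int.ofStr? (PySem.List.pyGetD instruction 1 "")).getD 0)
                     ((PySem.Int.ofStr? (PySem.List.pyGetD instruction 2 "")).getD 0) scr
    else if PySem.List.pyGetD instruction 0 "" = "rotate" then
      if PySem.List.pyGetD instruction 1 "" = "row" then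
        shift_row ((PySem.Int.ofStr? (PySem.List.pyGetD instruction 2 "")).getD 0)
                  ((PySem.Int.ofStr? (PySem.List.pyGetD instruction 3 "")).getD 0) scr
      else
        shift_column ((PySem.Int.ofStr? (PySem.List.pyGetD instruction 2 "")).getD 0)
                     ((PySem.Int.ofStr? (PySem.List.pyGetD instruction 3 "")).getD 0) scr
    else scr) screen

-- ===== PORT B =====
-- _rot(xs, k): one-shot rotation by k mod len(xs) via two slices (k %= n; xs[-k:] + xs[:-k])
def pvRot (xs : List String) (k : Int) : List String :=
  if xs.length = 0 then []
  else if PySem.Int.mod k (xs.length : Int) = 0 then xs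
  else PySem.List.slice xs (some (-(PySem.Int.mod k (xs.length : Int)))) none
       ++ PySem.List.slice xs none (some (-(PySem.Int.mod k (xs.length : Int))))

def part_one_alt (instructions : List (List String)) (screen : List (List String)) : List (List String) :=
  instructions.foldl (fun grid ins =>
    if PySem.List.pyGetD ins 0 "" = "rect" then
      (PySem.List.pyRange 0 ((PySem.Int.ofStr? (PySem.List.pyGetD ins 2 "")).getD 0) 1).foldl
        (fun g r =>
          (PySem.List.pyRange 0 ((PySem.Int.ofStr? (PySem.List.pyGetD ins 1 "")).getD 0) 1).foldl
            (fun g2 c => PySem.List.pySetD g2 r (PySem.List.pySetD (PySem.List.pyGetD g2 r []) c "#")) g) grid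
    else if PySem.List.pyGetD ins 0 "" = "rotate" then
      if 0 < (PySem.Int.ofStr? (PySem.List.pyGetD ins 3 "")).getD 0 then
        if PySem.List.pyGetD ins 1 "" = "row" then
          PySem.List.pySetD grid ((PySem.Int.ofStr? (PySem.List.pyGetD ins 2 "")).getD 0)
            (pvRot (PySem.List.pyGetD grid ((PySem.Int.ofStr? (PySem.List.pyGetD ins 2 "")).getD 0) [])
                   ((PySem.Int.ofStr? (PySem.List.pyGetD ins 3 "")).getD 0))
        else
          List.zipWith
            (fun row v => PySem.List.pySetD row ((PySem.Int.ofStr? (PySem.List.pyGetD ins 2 "")).getD 0) v)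
            grid
            (pvRot (grid.map (fun row => PySem.List.pyGetD row ((PySem.Int.ofStr? (PySem.List.pyGetD ins 2 "")).getD 0) ""))
                   ((PySem.Int.ofStr? (PySem.List.pyGetD ins 3 "")).getD 0))
      else grid
    else grid) screen

-- ===== PRECONDITION & SPEC =====
-- Pre_ is exactly "A returns normally" (it excludes NO input on which A returns): each
-- instruction must be non-empty (instruction[0] is read); a 'rect' needs its two int()
-- arguments to parse and, when both are positive, the filled rectangle to fit the screen
-- (else IndexError); a 'rotate' needs four fields, its two int() arguments to parse and,
-- when the amount is positive, the rotated row index (negative Python indices allowed) or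
-- the rotated column to exist in every row (else IndexError).
def insOK (L : List Nat) (ins : List String) : Bool :=
  !ins.isEmpty &&
  (if ins.getD 0 "" = "rect" then
     decide (3 ≤ ins.length) &&
     (PySem.Int.ofStr? (ins.getD 1 "")).isSome && (PySem.Int.ofStr? (ins.getD 2 "")).isSome &&
     (let a := (PySem.Int.ofStr? (ins.getD 1 "")).getD 0
      let b := (PySem.Int.ofStr? (ins.getD 2 "")).getD 0
      decide (a ≤ 0) || decide (b ≤ 0) ||
        (decide (b ≤ (L.length : Int)) && (L.take b.toNat).all (fun l => decide (a ≤ (l : Int)))))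
   else if ins.getD 0 "" = "rotate" then
     decide (4 ≤ ins.length) &&
     (PySem.Int.ofStr? (ins.getD 2 "")).isSome && (PySem.Int.ofStr? (ins.getD 3 "")).isSome &&
     (let i := (PySem.Int.ofStr? (ins.getD 2 "")).getD 0
      let k := (PySem.Int.ofStr? (ins.getD 3 "")).getD 0
      decide (k ≤ 0) ||
        (if ins.getD 1 "" = "row" then
           decide (-(L.length : Int) ≤ i) && decide (i < (L.length : Int))
         else
           decide (1 ≤ L.length) && L.all (fun l => decide (-(l : Int) ≤ i) && decide (i < (l : Int)))))
   else true)

def Pre_part_one (instructions : List (List String)) (screen : List (List String)) : Prop :=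
  instructions.all (insOK (screen.map List.length)) = true

instance (instructions : List (List String)) (screen : List (List String)) :
    Decidable (Pre_part_one instructions screen) := by unfold Pre_part_one; infer_instance

def pvWitness_part_one : List (List String) × List (List String) :=
  ([["rect", "2", "2"], ["rotate", "row", "0", "1"], ["rotate", "column", "1", "2"]],
   [[".", ".", "."], [".", ".", "."]])

def Spec_part_one (instructions : List (List String)) (screen : List (List String)) (out : List (List String)) : Prop := out = part_one_alt instructions screen
instance (instructions : List (List String)) (screen : List (List String)) (out : List (List String)) : Decidable (Spec_part_one instructions screen out) := by unfold Spec_part_one; infer_instance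

-- ===== CLAIM (what is proved, stated in full; the proofs are below) =====
def Claim_equal_part_one : Prop := ∀ (instructions : List (List String)) (screen : List (List String)), Dom_part_one instructions screen → Pre_part_one instructions screen → Spec_part_one instructions screen (part_one instructions screen)

-- ===== LEMMAS AND PROOFS =====

-- Python's index normalisation: the wrapped (nonnegative) index of i in a list of length n
def wrapIdx (n : Nat) (i : Int) : Nat := if 0 ≤ i then i.toNat else n - (-i).toNat

theorem pyIdx?_wrap (n : Nat) (i : Int) (h : PySem.Raise.InRange n i) :
    PySem.List.pyIdx? n i = some (wrapIdx n i) := by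
  obtain ⟨h1, h2⟩ := h
  by_cases h0 : 0 ≤ i
  · simp [PySem.List.pyIdx?, wrapIdx, h0, h2]
  · simp [PySem.List.pyIdx?, wrapIdx, h0, h1]

theorem pyIdx?_out (n : Nat) (i : Int) (h : ¬ PySem.Raise.InRange n i) :
    PySem.List.pyIdx? n i = none := by
  unfold PySem.Raise.InRange at h
  unfold PySem.List.pyIdx?
  split_ifs <;> first | rfl | omega

theorem wrapIdx_lt (n : Nat) (i : Int) (h : PySem.Raise.InRange n i) : wrapIdx n i < n := by
  obtain ⟨h1, h2⟩ := h
  unfold wrapIdx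
  split_ifs <;> omega

theorem pyGetD_wrap {α : Type} (xs : List α) (i : Int) (d : α) (h : PySem.Raise.InRange xs.length i) :
    PySem.List.pyGetD xs i d = (xs[wrapIdx xs.length i]?).getD d := by
  simp [PySem.List.pyGetD, PySem.List.pyGet?, pyIdx?_wrap _ _ h]

theorem pySetD_wrap {α : Type} (xs : List α) (i : Int) (v : α) (h : PySem.Raise.InRange xs.length i) :
    PySem.List.pySetD xs i v = xs.set (wrapIdx xs.length i) v := by
  simp [PySem.List.pySetD, PySem.List.pySet?, pyIdx?_wrap _ _ h]

theorem pySetD_out {α : Type} (xs : List α) (i : Int) (v : α) (h : ¬ PySem.Raise.InRange xs.length i) :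
    PySem.List.pySetD xs i v = xs := by
  simp [PySem.List.pySetD, PySem.List.pySet?, pyIdx?_out _ _ h]

theorem pySetD_pySetD_same {α : Type} (r : List α) (c : Int) (x y : α) :
    PySem.List.pySetD (PySem.List.pySetD r c x) c y = PySem.List.pySetD r c y := by
  by_cases h : PySem.Raise.InRange r.length c
  · have h' : PySem.Raise.InRange (PySem.List.pySetD r c x).length c := by
      rw [PySem.List.length_pySetD]; exact h
    rw [pySetD_wrap _ _ _ h', pySetD_wrap r c x h, pySetD_wrap r c y h,
        show wrapIdx (r.set (wrapIdx r.length c) x).length c = wrapIdx r.length c from by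
          rw [List.length_set],
        List.set_set]
  · have h' : ¬ PySem.Raise.InRange (PySem.List.pySetD r c x).length c := by
      rw [PySem.List.length_pySetD]; exact h
    rw [pySetD_out _ _ _ h', pySetD_out r c x h, pySetD_out r c y h]

theorem pyGetD_pySetD_self {α : Type} (r : List α) (c : Int) (x : α) (d : α)
    (h : PySem.Raise.InRange r.length c) :
    PySem.List.pyGetD (PySem.List.pySetD r c x) c d = x := by
  have h' : PySem.Raise.InRange (PySem.List.pySetD r c x).length c := by
    rw [PySem.List.length_pySetD]; exact h
  have hw : wrapIdx (PySem.List.pySetD r c x).length c = wrapIdx r.length c := by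
    rw [PySem.List.length_pySetD]
  rw [pyGetD_wrap _ _ _ h', hw, pySetD_wrap _ _ _ h, List.getElem?_set,
      if_pos rfl, if_pos (wrapIdx_lt _ _ h), Option.getD_some]

theorem pySetD_pyGetD_self {α : Type} (r : List α) (c : Int) (d : α)
    (h : PySem.Raise.InRange r.length c) :
    PySem.List.pySetD r c (PySem.List.pyGetD r c d) = r := by
  rw [pyGetD_wrap _ _ _ h, pySetD_wrap _ _ _ h,
      List.getElem?_eq_getElem (wrapIdx_lt _ _ h), Option.getD_some, List.set_getElem_self]

-- one single-cell right shift, as both programs' slice expressions produce it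
def rotStepB (v : List String) : List String :=
  if v = [] then v else PySem.List.pyGetD v (-1) "" :: PySem.List.slice v none (some (-1))

theorem rowstep_eq (r : List String) :
    PySem.List.slice r (some (-1)) none ++ PySem.List.slice r none (some (-1)) = rotStepB r := by
  unfold rotStepB
  rcases eq_or_ne r [] with h | h
  · subst h; simp [PySem.List.slice_from_neg_one, PySem.List.slice_to_neg_one]
  · rw [if_neg h, PySem.List.slice_from_neg_one, PySem.List.pyGetD_neg_one r "" h]
    rw [List.drop_length_sub_one h]; rfl

theorem length_rotStepB (v : List String) : (rotStepB v).length = v.length := by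
  unfold rotStepB
  rcases eq_or_ne v [] with h | h
  · subst h; simp
  · rw [if_neg h]
    have : v.length ≠ 0 := by simpa using (List.length_pos_of_ne_nil h).ne'
    simp [PySem.List.slice_to_neg_one, List.length_dropLast]
    omega

theorem rotStepB_rotate (v : List String) (h : v ≠ []) :
    rotStepB v = v.rotate (v.length - 1) := by
  unfold rotStepB
  rw [if_neg h, PySem.List.slice_to_neg_one, PySem.List.pyGetD_neg_one v "" h,
      List.rotate_eq_drop_append_take (by omega), List.drop_length_sub_one h,
      List.dropLast_eq_take]
  rfl

theorem iter_rotStepB (K : Nat) (v : List String) (h : v ≠ []) :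
    rotStepB^[K] v = v.rotate (K * (v.length - 1)) := by
  induction K with
  | zero => simp
  | succ K ih =>
    rw [Function.iterate_succ_apply', ih]
    have hne : v.rotate (K * (v.length - 1)) ≠ [] := by
      intro hx
      have := congrArg List.length hx
      simp only [List.length_rotate, List.length_nil] at this
      exact h (List.eq_nil_of_length_eq_zero this)
    rw [rotStepB_rotate _ hne, List.length_rotate, List.rotate_rotate, Nat.succ_mul]

theorem length_iter_rotStepB (K : Nat) (v : List String) : (rotStepB^[K] v).length = v.length := by
  induction K with
  | zero => simp
  | succ K ih => rw [Function.iterate_succ_apply', length_rotStepB, ih]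

theorem modlem (K n : Nat) (hn : 0 < n) : (K * (n - 1)) % n = (n - K % n) % n := by
  rcases Nat.lt_or_ge n 2 with h1 | h1
  · have hn1 : n = 1 := by omega
    subst hn1; simp [Nat.mod_one]
  · have hr : K % n < n := Nat.mod_lt _ hn
    rw [Nat.mul_mod, Nat.mod_eq_of_lt (show n - 1 < n by omega)]
    set r := K % n with hrdef
    by_cases h0 : r = 0
    · simp [h0]
    · have hle : r ≤ n := Nat.le_of_lt hr
      have h1r : 1 ≤ r := by omega
      have h2 : r * (n - 1) = (n - r) + (r - 1) * n := by
        zify [hle, h1r, show 1 ≤ n by omega]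
        ring
      rw [h2, Nat.add_mul_mod_self_right]

theorem pvRot_eq_iter (xs : List String) (k : Int) (hk : 0 < k) :
    pvRot xs k = rotStepB^[k.toNat] xs := by
  rcases eq_or_ne xs [] with h | h
  · subst h
    rw [Function.iterate_fixed (show rotStepB [] = [] from rfl)]
    rfl
  · have hn : 0 < xs.length := List.length_pos_of_ne_nil h
    have hkK : k = ((k.toNat : Nat) : Int) := by omega
    rw [iter_rotStepB k.toNat xs h]
    unfold pvRot
    rw [if_neg (by omega)]
    have hmod : PySem.Int.mod k (xs.length : Int) = ((k.toNat % xs.length : Nat) : Int) := by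
      rw [hkK]; exact PySem.Int.mod_natCast k.toNat xs.length
    rw [hmod]
    set r := k.toNat % xs.length with hr
    by_cases h0 : r = 0
    · rw [if_pos (by exact_mod_cast h0), ← List.rotate_mod, modlem _ _ hn, ← hr, h0,
          Nat.sub_zero, Nat.mod_self, List.rotate_zero]
    · have hrpos : 0 < r := Nat.pos_of_ne_zero h0
      have hrlt : r < xs.length := by rw [hr]; exact Nat.mod_lt _ hn
      rw [if_neg (by exact_mod_cast h0),
          PySem.List.slice_from_neg_natCast xs r hrpos, PySem.List.slice_to_neg_natCast xs r hrpos,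
          ← List.rotate_mod, modlem _ _ hn, ← hr, Nat.mod_eq_of_lt (by omega)]
      exact (List.rotate_eq_drop_append_take (by omega)).symm

theorem length_pvRot (xs : List String) (k : Int) (hk : 0 < k) : (pvRot xs k).length = xs.length := by
  rw [pvRot_eq_iter xs k hk, length_iter_rotStepB]

-- foldl that ignores the list element = function iteration
theorem foldl_const_iter {α : Type} (f : α → α) : ∀ (l : List Int) (a : α),
    l.foldl (fun x _ => f x) a = f^[l.length] a := by
  intro l
  induction l with
  | nil => intro a; rfl
  | cons x t ih =>
    intro a
    rw [List.foldl_cons, ih, List.length_cons, Function.iterate_succ_apply]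

-- ----- row branch -----

theorem shiftrow_fold (i : Int) : ∀ (l : List Int) (m : List (List String)),
    PySem.Raise.InRange m.length i →
    l.foldl (fun m2 _ =>
        PySem.List.pySetD m2 i
          (PySem.List.slice (PySem.List.pyGetD m2 i []) (some (-1)) none
            ++ PySem.List.slice (PySem.List.pyGetD m2 i []) none (some (-1)))) m
      = PySem.List.pySetD m i (l.foldl (fun v _ => rotStepB v) (PySem.List.pyGetD m i [])) := by
  intro l
  induction l with
  | nil =>
    intro m h
    rw [List.foldl_nil, List.foldl_nil, pyGetD_wrap _ _ _ h, pySetD_wrap _ _ _ h,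
        List.getElem?_eq_getElem (wrapIdx_lt _ _ h), Option.getD_some, List.set_getElem_self]
  | cons x t ih =>
    intro m h
    rw [List.foldl_cons, List.foldl_cons, rowstep_eq]
    set m' := PySem.List.pySetD m i (rotStepB (PySem.List.pyGetD m i [])) with hm'
    have hlen : m'.length = m.length := by rw [hm', PySem.List.length_pySetD]
    have h' : PySem.Raise.InRange m'.length i := by rw [hlen]; exact h
    rw [ih m' h']
    have hw : wrapIdx m'.length i = wrapIdx m.length i := by rw [hlen]
    have hget' : PySem.List.pyGetD m' i [] = rotStepB (PySem.List.pyGetD m i []) := by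
      rw [pyGetD_wrap _ _ _ h', hw, hm', pySetD_wrap _ _ _ h, List.getElem?_set,
          if_pos rfl, if_pos (wrapIdx_lt _ _ h), Option.getD_some]
    rw [hget', hm', pySetD_pySetD_same]

theorem row_branch (i k : Int) (s : List (List String)) (hk : 0 < k)
    (h : PySem.Raise.InRange s.length i) :
    shift_row i k s = PySem.List.pySetD s i (pvRot (PySem.List.pyGetD s i []) k) := by
  unfold shift_row
  rw [shiftrow_fold i _ s h, foldl_const_iter, PySem.List.length_pyRange_one,
      Int.sub_zero, ← pvRot_eq_iter _ _ hk]

theorem shift_row_nonpos (i k : Int) (s : List (List String)) (hk : k ≤ 0) :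
    shift_row i k s = s := by
  unfold shift_row
  rw [PySem.List.pyRange_one_eq_nil (by omega), List.foldl_nil]

-- ----- column branch -----

def colOf (c : Int) (m : List (List String)) : List String :=
  m.map (fun r => PySem.List.pyGetD r c "")

def colApply (c : Int) (m : List (List String)) (v : List String) : List (List String) :=
  List.zipWith (fun r x => PySem.List.pySetD r c x) m v

theorem get_elements_eq (c : Int) (s : List (List String)) : get_elements c s = colOf c s := by
  unfold get_elements colOf
  rw [PySem.List.foldl_append_singleton_eq_map
        (fun i => PySem.List.pyGetD (PySem.List.pyGetD s i []) c "") _ []]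
  have h0 := PySem.List.map_pyGetD_pyRange_zero s ([] : List String)
  rw [show PySem.List.len s = (s.length : Int) from by simp [PySem.List.len]] at h0
  conv_rhs => rw [← h0, List.map_map]
  rfl

def stepCol (c : Int) (m : List (List String)) : List (List String) :=
  let pixels := get_elements c m
  let m1 := PySem.List.pySetD m 0
    (PySem.List.pySetD (PySem.List.pyGetD m 0 []) c (PySem.List.pyGetD pixels (-1) ""))
  (PySem.List.pyRange 1 (m1.length : Int) 1).foldl (fun m2 i =>
    PySem.List.pySetD m2 i
      (PySem.List.pySetD (PySem.List.pyGetD m2 i []) c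
        (PySem.List.pyGetD pixels (i - 1) ""))) m1

def rotStep (v : List String) : List String := PySem.List.pyGetD v (-1) "" :: v.dropLast

theorem rotStepB_of_ne {v : List String} (h : v ≠ []) : rotStepB v = rotStep v := by
  unfold rotStepB rotStep
  rw [if_neg h, PySem.List.slice_to_neg_one]

theorem length_colOf (c : Int) (m : List (List String)) : (colOf c m).length = m.length := by
  unfold colOf; simp

theorem length_rotStep {v : List String} (h : v ≠ []) : (rotStep v).length = v.length := by
  unfold rotStep
  have : v.length ≠ 0 := by simpa using (List.length_pos_of_ne_nil h).ne'
  simp [List.length_dropLast]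
  omega

-- elementary facts about writing a cell



theorem colApply_getElem? (c : Int) (v : List String) (m : List (List String)) (j : Nat)
    (hj : j < m.length) (hjv : j < v.length) :
    (colApply c m v)[j]? = some (PySem.List.pySetD (m[j]'hj) c (v[j]'hjv)) := by
  unfold colApply
  rw [List.getElem?_zipWith, List.getElem?_eq_getElem hj, List.getElem?_eq_getElem hjv]

theorem length_colApply (c : Int) (v : List String) (m : List (List String)) :
    (colApply c m v).length = min m.length v.length := by
  unfold colApply; exact List.length_zipWith

theorem shape_colApply (c : Int) (v : List String) (m : List (List String))
    (hlen : m.length ≤ v.length) :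
    (colApply c m v).map List.length = m.map List.length := by
  apply List.ext_getElem?
  intro j
  rw [List.getElem?_map, List.getElem?_map]
  by_cases hj : j < m.length
  · rw [colApply_getElem? c v m j hj (by omega), List.getElem?_eq_getElem hj]
    simp only [Option.map_some]
    rw [PySem.List.length_pySetD]
  · rw [List.getElem?_eq_none (by rw [length_colApply]; omega),
        List.getElem?_eq_none (by omega)]

theorem colOf_colApply (c : Int) (v : List String) (m : List (List String))
    (hlen : v.length = m.length) (hrow : ∀ r ∈ m, PySem.Raise.InRange r.length c) :
    colOf c (colApply c m v) = v := by
  apply List.ext_getElem?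
  intro j
  unfold colOf
  rw [List.getElem?_map]
  by_cases hj : j < m.length
  · rw [colApply_getElem? c v m j hj (by omega)]
    simp only [Option.map_some]
    rw [List.getElem?_eq_getElem (by omega : j < v.length)]
    congr 1
    exact pyGetD_pySetD_self _ _ _ _ (hrow _ (List.getElem_mem hj))
  · rw [List.getElem?_eq_none, List.getElem?_eq_none (by omega)]
    · rfl
    · rw [length_colApply]; omega

theorem colApply_colApply (c : Int) (v w : List String) (m : List (List String))
    (hlen : v.length = m.length) :
    colApply c (colApply c m v) w = colApply c m w := by
  apply List.ext_getElem?
  intro j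
  by_cases hj : j < min m.length w.length
  · have hjm : j < m.length := by omega
    have hjw : j < w.length := by omega
    have hjca : j < (colApply c m v).length := by rw [length_colApply]; omega
    rw [colApply_getElem? c w _ j hjca hjw, colApply_getElem? c w m j hjm hjw]
    have hx := colApply_getElem? c v m j hjm (by omega)
    rw [List.getElem?_eq_getElem hjca] at hx
    rw [Option.some.inj hx, pySetD_pySetD_same]
  · rw [List.getElem?_eq_none, List.getElem?_eq_none]
    · rw [length_colApply]; omega
    · rw [length_colApply, length_colApply]; omega

theorem colApply_self (c : Int) (m : List (List String))
    (hrow : ∀ r ∈ m, PySem.Raise.InRange r.length c) :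
    colApply c m (colOf c m) = m := by
  apply List.ext_getElem?
  intro j
  by_cases hj : j < m.length
  · rw [colApply_getElem? c _ m j hj (by rw [length_colOf]; omega),
        List.getElem?_eq_getElem hj]
    congr 1
    have hcolj : (colOf c m)[j]'(by rw [length_colOf]; omega)
        = PySem.List.pyGetD (m[j]'hj) c "" := by
      unfold colOf; rw [List.getElem_map]
    rw [hcolj]
    exact pySetD_pyGetD_self _ _ _ (hrow _ (List.getElem_mem hj))
  · rw [List.getElem?_eq_none (by rw [length_colApply, length_colOf]; omega),
        List.getElem?_eq_none (by omega)]


-- reusable mapform machinery (row-indexed loops that set one row each step)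
def mapform (a b : Int) (f : Int → List String → List String) (s : List (List String)) :
    List (List String) :=
  (PySem.List.enumerate s 0).map (fun p => if a ≤ p.1 ∧ p.1 < b then f p.1 p.2 else p.2)

theorem enumMap_getElem? (f : Int × List String → List String) (s : List (List String)) (j : Nat) :
    ((PySem.List.enumerate s 0).map f)[j]? = s[j]?.map (fun r => f (((j : Nat) : Int), r)) := by
  simp only [List.getElem?_map, PySem.List.getElem?_enumerate, Option.map_map, zero_add]
  rfl

theorem mapform_getElem? (a b : Int) (f : Int → List String → List String)
    (s : List (List String)) (j : Nat) :
    (mapform a b f s)[j]? = s[j]?.map (fun r => if a ≤ (j : Int) ∧ (j : Int) < b then f j r else r) := by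
  unfold mapform
  rw [enumMap_getElem?]

theorem length_mapform (a b : Int) (f : Int → List String → List String) (s : List (List String)) :
    (mapform a b f s).length = s.length := by
  unfold mapform; simp [PySem.List.length_enumerate]

theorem mapform_eq_self (a b : Int) (f : Int → List String → List String) (s : List (List String))
    (hab : b ≤ a ∨ b ≤ 0) : mapform a b f s = s := by
  apply List.ext_getElem?
  intro j
  rw [mapform_getElem?]
  rcases h : s[j]? with _ | r
  · rfl
  · simp only [Option.map_some]
    congr 1
    rw [if_neg (by omega)]

theorem foldl_setrow_range (s : List (List String)) (f : Int → List String → List String)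
    (step : List (List String) → Int → List (List String))
    (hstep : ∀ (m : List (List String)) (j : Nat), m.length = s.length → j < s.length →
      step m (j : Int) = m.set j (f (j : Int) (m.getD j [])))
    (a b : Nat) (hb : b ≤ s.length) :
    (PySem.List.pyRange (a : Int) (b : Int) 1).foldl step s = mapform a b f s := by
  induction b with
  | zero =>
    rw [PySem.List.pyRange_one_eq_nil (by omega), List.foldl_nil,
        mapform_eq_self _ _ _ _ (Or.inr (by omega))]
  | succ b ih =>
    by_cases hab : a ≤ b
    · have hb' : b ≤ s.length := by omega
      rw [show ((b + 1 : Nat) : Int) = (b : Int) + 1 by push_cast; ring,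
          PySem.List.pyRange_one_succ_right (by omega), List.foldl_append, ih hb',
          List.foldl_cons, List.foldl_nil]
      have hlen : (mapform a b f s).length = s.length := length_mapform a b f s
      have hjb : b < s.length := by omega
      rw [hstep _ b hlen hjb]
      have hM? : (mapform (a:Int) (b:Int) f s)[b]? = some (s[b]'hjb) := by
        rw [mapform_getElem?, List.getElem?_eq_getElem hjb]
        simp only [Option.map_some]
        rw [if_neg (by omega)]
      have hMb : (mapform (a:Int) (b:Int) f s).getD b [] = s[b]'hjb := by
        have h3 := List.getElem?_eq_getElem (show b < (mapform (a:Int) (b:Int) f s).length by omega)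
        rw [hM?] at h3
        rw [List.getD_eq_getElem _ [] (by omega)]
        exact (Option.some.inj h3).symm
      rw [hMb]
      apply List.ext_getElem?
      intro j
      rw [List.getElem?_set, mapform_getElem? (a:Int) ((b:Int)+1) f s j,
          mapform_getElem? (a:Int) (b:Int) f s j]
      by_cases hj : b = j
      · subst hj
        rw [if_pos rfl, if_pos (by omega), List.getElem?_eq_getElem hjb]
        simp only [Option.map_some]
        rw [if_pos (by omega)]
      · rw [if_neg hj]
        rcases hs : s[j]? with _ | r
        · rfl
        · simp only [Option.map_some]
          congr 1
          by_cases hcond : (a:Int) ≤ (j:Int) ∧ (j:Int) < (b:Int)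
          · rw [if_pos hcond, if_pos (by omega)]
          · rw [if_neg hcond, if_neg (by omega)]
    · rw [PySem.List.pyRange_one_eq_nil (by omega), List.foldl_nil,
          mapform_eq_self _ _ _ _ (Or.inl (by omega))]

theorem foldl_setrow_range' (s : List (List String)) (f : Int → List String → List String)
    (step : List (List String) → Int → List (List String))
    (hstep : ∀ (m : List (List String)) (j : Nat), m.length = s.length → j < s.length →
      step m (j : Int) = m.set j (f (j : Int) (m.getD j [])))
    (a b : Int) (ha : 0 ≤ a) (hb : 0 ≤ b) (hbn : b ≤ (s.length : Int)) :
    (PySem.List.pyRange a b 1).foldl step s = mapform a b f s := by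
  rw [show a = ((a.toNat : Nat) : Int) from (Int.toNat_of_nonneg ha).symm,
      show b = ((b.toNat : Nat) : Int) from (Int.toNat_of_nonneg hb).symm]
  exact foldl_setrow_range s f step hstep a.toNat b.toNat (by omega)

theorem stepCol_eq (c : Int) (m : List (List String)) (h0 : m ≠ []) :
    stepCol c m = colApply c m (rotStep (colOf c m)) := by
  have hn : 0 < m.length := List.length_pos_of_ne_nil h0
  have hcol : (colOf c m).length = m.length := length_colOf c m
  unfold stepCol
  dsimp only
  rw [get_elements_eq]
  rw [show (PySem.List.pySetD m 0
      (PySem.List.pySetD (PySem.List.pyGetD m 0 []) c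
        (PySem.List.pyGetD (colOf c m) (-1) ""))).length = m.length from
    PySem.List.length_pySetD m 0 _]
  rw [foldl_setrow_range' _
        (fun i r => PySem.List.pySetD r c (PySem.List.pyGetD (colOf c m) (i - 1) ""))
        _ ?hstep 1 (m.length : Int) (by omega) (by omega)
        (by rw [PySem.List.length_pySetD]) ]
  case hstep =>
    intro m2 j hm2 hj
    simp [PySem.List.pySetD_of_nonneg, PySem.List.pyGetD_natCast]
  · apply List.ext_getElem?
    intro j
    rw [mapform_getElem?]
    unfold colApply
    rw [List.getElem?_zipWith]
    by_cases hj : j < m.length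
    · rw [PySem.List.pySetD_of_nonneg m _ (by omega : (0:Int) ≤ 0), List.getElem?_set,
          List.getElem?_eq_getElem hj,
          show rotStep (colOf c m)
              = PySem.List.pyGetD (colOf c m) (-1) "" :: (colOf c m).dropLast from rfl,
          List.getElem?_cons]
      by_cases hj0 : j = 0
      · subst hj0
        rw [show Int.toNat 0 = 0 from rfl, if_pos rfl, if_pos hj, if_pos rfl]
        simp only [Option.map_some]
        rw [if_neg (by norm_num)]
        have e1 : PySem.List.pyGetD m 0 [] = m[0]'hj := by
          rw [PySem.List.pyGetD_zero, List.getD_eq_getElem m [] hj]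
        rw [e1]
      · rw [if_neg (fun hc0 => hj0 hc0.symm), if_neg hj0,
            List.getElem?_eq_getElem (show j - 1 < (colOf c m).dropLast.length by
              rw [List.length_dropLast, hcol]; omega)]
        simp only [Option.map_some]
        rw [if_pos (by constructor <;> omega)]
        have ht : ((j:Int) - 1).toNat = j - 1 := by omega
        have e2 : PySem.List.pyGetD (colOf c m) ((j:Int) - 1) ""
            = (colOf c m).dropLast[j-1]'(by rw [List.length_dropLast, hcol]; omega) := by
          rw [PySem.List.pyGetD_eq_getElem (colOf c m) "" (by omega)
                (by rw [hcol]; omega),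
              List.getElem_dropLast]
          simp only [ht]
        rw [e2]
    · rw [List.getElem?_eq_none (by rw [PySem.List.length_pySetD]; omega),
          List.getElem?_eq_none (by omega)]
      rfl

theorem shift_column_eq_foldl (c k : Int) (m : List (List String)) :
    shift_column c k m = (PySem.List.pyRange 0 k 1).foldl (fun acc _ => stepCol c acc) m := rfl

theorem colIter (c : Int) (s : List (List String)) (h0 : s ≠ [])
    (hrow : ∀ r ∈ s, PySem.Raise.InRange r.length c) :
    ∀ (l : List Int) (m : List (List String)), m.map List.length = s.map List.length →
    l.foldl (fun acc _ => stepCol c acc) m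
      = colApply c m (l.foldl (fun v _ => rotStepB v) (colOf c m)) := by
  have hrowOf : ∀ (m : List (List String)), m.map List.length = s.map List.length →
      ∀ r ∈ m, PySem.Raise.InRange r.length c := by
    intro m hm r hr
    have h1 : r.length ∈ s.map List.length := by
      rw [← hm]; exact List.mem_map_of_mem hr
    obtain ⟨r', hr', hlen⟩ := List.mem_map.mp h1
    rw [← hlen]
    exact hrow r' hr'
  intro l
  induction l with
  | nil =>
    intro m hm
    simp only [List.foldl_nil]
    exact (colApply_self c m (hrowOf m hm)).symm
  | cons x t ih =>
    intro m hm
    have h0m : m ≠ [] := by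
      intro hx
      rw [hx] at hm
      exact h0 (List.map_eq_nil_iff.mp hm.symm)
    simp only [List.foldl_cons]
    have hcolne : colOf c m ≠ [] := by
      intro hx
      have h1 := length_colOf c m
      rw [hx] at h1
      simp only [List.length_nil] at h1
      exact h0m (List.eq_nil_of_length_eq_zero h1.symm)
    have hstep := stepCol_eq c m h0m
    have hvlen : (rotStep (colOf c m)).length = m.length := by
      rw [length_rotStep hcolne, length_colOf]
    set m' := stepCol c m with hm'
    have hm'e : m' = colApply c m (rotStep (colOf c m)) := hstep
    have hm'shape : m'.map List.length = s.map List.length := by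
      rw [hm'e, shape_colApply c _ m (by omega), hm]
    rw [ih m' hm'shape]
    have hcol' : colOf c m' = rotStepB (colOf c m) := by
      rw [hm'e, colOf_colApply c _ m hvlen (hrowOf m hm), rotStepB_of_ne hcolne]
    rw [hcol', hm'e, colApply_colApply c _ _ m hvlen]

theorem col_branch (c k : Int) (s : List (List String)) (hk : 0 < k) (h0 : s ≠ [])
    (hrow : ∀ r ∈ s, PySem.Raise.InRange r.length c) :
    shift_column c k s = colApply c s (pvRot (colOf c s) k) := by
  rw [shift_column_eq_foldl, colIter c s h0 hrow _ s rfl, foldl_const_iter,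
      PySem.List.length_pyRange_one, Int.sub_zero, ← pvRot_eq_iter _ _ hk]

theorem shift_column_nonpos (c k : Int) (s : List (List String)) (hk : k ≤ 0) :
    shift_column c k s = s := by
  rw [shift_column_eq_foldl, PySem.List.pyRange_one_eq_nil (by omega), List.foldl_nil]

-- ----- shapes -----

theorem shape_cell (m : List (List String)) (r c : Int) (x : String) :
    (PySem.List.pySetD m r (PySem.List.pySetD (PySem.List.pyGetD m r []) c x)).map List.length
      = m.map List.length := by
  by_cases h : PySem.Raise.InRange m.length r
  · rw [pySetD_wrap _ _ _ h, pyGetD_wrap _ _ _ h]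
    apply List.ext_getElem?
    intro j
    rw [List.getElem?_map, List.getElem?_map, List.getElem?_set]
    by_cases hj : wrapIdx m.length r = j
    · rw [if_pos hj, if_pos (hj ▸ wrapIdx_lt _ _ h), ← hj,
          List.getElem?_eq_getElem (wrapIdx_lt _ _ h)]
      simp only [Option.map_some, Option.getD_some]
      rw [PySem.List.length_pySetD]
    · rw [if_neg hj]
  · rw [pySetD_out _ _ _ h]

theorem foldl_shape {β : Type} (f : List (List String) → β → List (List String))
    (h : ∀ m b, (f m b).map List.length = m.map List.length) :
    ∀ (l : List β) (m : List (List String)), ((l.foldl f m).map List.length) = m.map List.length := by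
  intro l
  induction l with
  | nil => intro m; rfl
  | cons x t ih => intro m; rw [List.foldl_cons, ih, h]

theorem shape_rect (a b : Int) (s : List (List String)) :
    ((PySem.List.pyRange 0 b 1).foldl (fun g r =>
        (PySem.List.pyRange 0 a 1).foldl (fun g2 c =>
          PySem.List.pySetD g2 r (PySem.List.pySetD (PySem.List.pyGetD g2 r []) c "#")) g) s).map
      List.length = s.map List.length := by
  apply foldl_shape
  intro m r
  apply foldl_shape
  intro m2 c
  exact shape_cell m2 r c "#"

-- ----- one instruction -----

def stepA (scr : List (List String)) (instruction : List String) : List (List String) :=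
  if PySem.List.pyGetD instruction 0 "" = "rect" then
    turn_pixels_on ((PySem.Int.ofStr? (PySem.List.pyGetD instruction 1 "")).getD 0)
                   ((PySem.Int.ofStr? (PySem.List.pyGetD instruction 2 "")).getD 0) scr
  else if PySem.List.pyGetD instruction 0 "" = "rotate" then
    if PySem.List.pyGetD instruction 1 "" = "row" then
      shift_row ((PySem.Int.ofStr? (PySem.List.pyGetD instruction 2 "")).getD 0)
                ((PySem.Int.ofStr? (PySem.List.pyGetD instruction 3 "")).getD 0) scr
    else
      shift_column ((PySem.Int.ofStr? (PySem.List.pyGetD instruction 2 "")).getD 0)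
                   ((PySem.Int.ofStr? (PySem.List.pyGetD instruction 3 "")).getD 0) scr
  else scr

def stepB (grid : List (List String)) (ins : List String) : List (List String) :=
  if PySem.List.pyGetD ins 0 "" = "rect" then
    (PySem.List.pyRange 0 ((PySem.Int.ofStr? (PySem.List.pyGetD ins 2 "")).getD 0) 1).foldl
      (fun g r =>
        (PySem.List.pyRange 0 ((PySem.Int.ofStr? (PySem.List.pyGetD ins 1 "")).getD 0) 1).foldl
          (fun g2 c => PySem.List.pySetD g2 r (PySem.List.pySetD (PySem.List.pyGetD g2 r []) c "#")) g) grid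
  else if PySem.List.pyGetD ins 0 "" = "rotate" then
    if 0 < (PySem.Int.ofStr? (PySem.List.pyGetD ins 3 "")).getD 0 then
      if PySem.List.pyGetD ins 1 "" = "row" then
        PySem.List.pySetD grid ((PySem.Int.ofStr? (PySem.List.pyGetD ins 2 "")).getD 0)
          (pvRot (PySem.List.pyGetD grid ((PySem.Int.ofStr? (PySem.List.pyGetD ins 2 "")).getD 0) [])
                 ((PySem.Int.ofStr? (PySem.List.pyGetD ins 3 "")).getD 0))
      else
        List.zipWith
          (fun row v => PySem.List.pySetD row ((PySem.Int.ofStr? (PySem.List.pyGetD ins 2 "")).getD 0) v)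
          grid
          (pvRot (grid.map (fun row => PySem.List.pyGetD row ((PySem.Int.ofStr? (PySem.List.pyGetD ins 2 "")).getD 0) ""))
                 ((PySem.Int.ofStr? (PySem.List.pyGetD ins 3 "")).getD 0))
    else grid
  else grid

theorem step_eq (ins : List String) (s : List (List String))
    (h : insOK (s.map List.length) ins = true) :
    stepA s ins = stepB s ins ∧ (stepB s ins).map List.length = s.map List.length := by
  unfold stepA stepB
  rw [PySem.List.pyGetD_zero, PySem.List.pyGetD_ofNat' ins 1 "",
      PySem.List.pyGetD_ofNat' ins 2 "", PySem.List.pyGetD_ofNat' ins 3 ""]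
  unfold insOK at h
  rw [Bool.and_eq_true] at h
  obtain ⟨hne, hcond⟩ := h
  by_cases h0 : ins.getD 0 "" = "rect"
  · simp only [if_pos h0] at hcond ⊢
    exact ⟨rfl, shape_rect ((PySem.Int.ofStr? (ins.getD 1 "")).getD 0)
      ((PySem.Int.ofStr? (ins.getD 2 "")).getD 0) s⟩
  · simp only [if_neg h0] at hcond ⊢
    by_cases h1 : ins.getD 0 "" = "rotate"
    · simp only [if_pos h1] at hcond ⊢
      simp only [Bool.and_eq_true, Bool.or_eq_true, decide_eq_true_eq] at hcond
      obtain ⟨⟨⟨hlen4, hs2⟩, hs3⟩, hrest⟩ := hcond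
      set i := (PySem.Int.ofStr? (ins.getD 2 "")).getD 0 with hidef
      set k := (PySem.Int.ofStr? (ins.getD 3 "")).getD 0 with hkdef
      by_cases hk : 0 < k
      · simp only [if_pos hk]
        have hrest' := hrest.resolve_left (by omega)
        by_cases h2 : ins.getD 1 "" = "row"
        · simp only [if_pos h2] at hrest' ⊢
          simp only [Bool.and_eq_true, decide_eq_true_eq] at hrest'
          have hin : PySem.Raise.InRange s.length i := by
            constructor <;> simp only [List.length_map] at hrest' <;> omega
          refine ⟨row_branch i k s hk hin, ?_⟩
          rw [pySetD_wrap _ _ _ hin]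
          apply List.ext_getElem?
          intro j
          rw [List.getElem?_map, List.getElem?_map, List.getElem?_set]
          by_cases hj : wrapIdx s.length i = j
          · rw [if_pos hj, if_pos (hj ▸ wrapIdx_lt _ _ hin), ← hj,
                List.getElem?_eq_getElem (wrapIdx_lt _ _ hin)]
            simp only [Option.map_some]
            rw [length_pvRot _ _ hk, pyGetD_wrap _ _ _ hin,
                List.getElem?_eq_getElem (wrapIdx_lt _ _ hin), Option.getD_some]
          · rw [if_neg hj]
        · simp only [if_neg h2] at hrest' ⊢
          simp only [Bool.and_eq_true, decide_eq_true_eq, List.all_eq_true] at hrest'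
          obtain ⟨hn1, hall⟩ := hrest'
          have h0s : s ≠ [] := by
            intro hx
            rw [hx] at hn1
            simp at hn1
          have hrow : ∀ r ∈ s, PySem.Raise.InRange r.length i := by
            intro r hr
            exact hall r.length (List.mem_map_of_mem hr)
          refine ⟨col_branch i k s hk h0s hrow, ?_⟩
          show (colApply i s (pvRot (colOf i s) k)).map List.length = s.map List.length
          exact shape_colApply i _ s (by rw [length_pvRot _ _ hk, length_colOf])
      · simp only [if_neg hk]
        refine ⟨?_, by trivial⟩
        by_cases h2 : ins.getD 1 "" = "row"
        · simp only [if_pos h2]; exact shift_row_nonpos i k s (by omega)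
        · simp only [if_neg h2]; exact shift_column_nonpos i k s (by omega)
    · simp only [if_neg h1] at hcond ⊢
      exact ⟨by trivial, by trivial⟩

theorem part_one_eq_foldl (instrs : List (List String)) (s : List (List String)) :
    part_one instrs s = instrs.foldl stepA s := rfl

theorem part_one_alt_eq_foldl (instrs : List (List String)) (s : List (List String)) :
    part_one_alt instrs s = instrs.foldl stepB s := rfl

theorem main_lemma : ∀ (instrs : List (List String)) (s : List (List String)),
    (∀ ins ∈ instrs, insOK (s.map List.length) ins = true) →
    part_one instrs s = part_one_alt instrs s := by
  intro instrs
  induction instrs with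
  | nil => intro s _; rfl
  | cons ins t ih =>
    intro s h
    have h1 := h ins (by simp)
    have ht := fun i hi => h i (List.mem_cons_of_mem _ hi)
    obtain ⟨he, hsh⟩ := step_eq ins s h1
    rw [part_one_eq_foldl, List.foldl_cons, ← part_one_eq_foldl,
        part_one_alt_eq_foldl, List.foldl_cons, ← part_one_alt_eq_foldl]
    show part_one t (stepA s ins) = part_one_alt t (stepB s ins)
    rw [he]
    exact ih (stepB s ins) (fun i hi => by rw [hsh]; exact ht i hi)

-- ===== VERDICT (by name: the statement is the Claim_ definition above) =====
theorem part_one_spec : Claim_equal_part_one := by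
  intro instructions screen _ hpre
  unfold Spec_part_one
  exact main_lemma instructions screen (by simpa [Pre_part_one, List.all_eq_true] using hpre)
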